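-- pv_equiv track=rewrite | github.com/dillonp23/CSPT19_Sprint_2 | 2.4/module_project.py | fibonacciSimpleSum2
-- ===== SOURCE A (Python) =====
-- def fibonacciSimpleSum2(n):
--     if n == 1:
--         return True
--
--     fib_nums = [0, 1]
--     i = 2
--
--     # continue looping until the last number in fib_nums is >= n
--     while fib_nums[-1] < n:
--         curr_fib_num = fib_nums[i - 1] + fib_nums[i - 2]
--         target_num = n - curr_fib_num
--
--         if target_num < curr_fib_num:
--             result = fibSumHelper(fib_nums, target_num)
--
--             if result + curr_fib_num == n:
--                 return True
--
--         fib_nums.append(curr_fib_num)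
--         i += 1
--
--     return False
--
-- def fibSumHelper(nums, target):
--     start, end = 0, len(nums) - 1
--
--     while start <= end:
--         mid = (start + end) // 2
--         result = nums[mid]
--
--         if result == target:
--             return result
--         elif result < target:
--             start = mid + 1
--         else:
--             end = mid - 1
--
--     return -1
-- ===== SOURCE B (Python) =====
-- def fibonacciSimpleSum2(n):
--     fibs = {0, 1}
--     a, b = 0, 1
--     while a + b <= n:
--         a, b = b, a + b
--         fibs.add(b)
--     return any(n - f in fibs for f in fibs)
-- ===== Notes on version B (the rewrite author's own statement) =====
-- stated objective: simpler
-- what changed: A interleaves building the Fibonacci list with a binary search for the complement at each step; B first builds the complete set of Fibonacci numbers up to n and then does one membership scan for any f with n-f in the set.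
-- intended difference: On n=0 A returns False though 0=0+0, and on n>=12 with n+1 a Fibonacci number A returns True because its binary-search sentinel -1 satisfies result+curr==n even though such n (e.g. 12, 20, 33, 88) are not sums of two Fibonacci numbers; B returns the correct answer (True for 0, False for the others), which is the intended behaviour. — e.g. on fibonacciSimpleSum2(0): A returns false, B returns true
import Mathlib
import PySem

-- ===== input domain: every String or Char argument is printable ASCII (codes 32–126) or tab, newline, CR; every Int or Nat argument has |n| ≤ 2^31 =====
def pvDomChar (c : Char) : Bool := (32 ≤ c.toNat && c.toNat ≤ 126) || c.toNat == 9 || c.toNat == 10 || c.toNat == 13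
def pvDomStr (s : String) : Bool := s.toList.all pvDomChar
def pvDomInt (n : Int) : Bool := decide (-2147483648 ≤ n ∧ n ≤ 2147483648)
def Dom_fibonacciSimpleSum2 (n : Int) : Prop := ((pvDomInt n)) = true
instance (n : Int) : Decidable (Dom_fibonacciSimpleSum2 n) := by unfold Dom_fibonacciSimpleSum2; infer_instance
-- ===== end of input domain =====

-- B builds the complete Fibonacci set up to n first and then scans it once for a complement,
-- instead of A's interleaved build-and-binary-search; B also returns the intended answer on the
-- inputs described at D_ below, where A's sentinel arithmetic goes wrong.

-- ===== PORT A =====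
-- binary search helper, transliterated; fuel bounds the halving loop (length+1 always suffices,
-- and on exhaustion it returns -1 exactly like the not-found path)
def fibSumGo (nums : List Int) (target : Int) (start stop : Int) : Nat → Int
  | 0 => -1
  | fuel + 1 =>
    if start ≤ stop then
      let mid := PySem.Int.floordiv (start + stop) 2
      let result := PySem.List.pyGetD nums mid 0   -- index always in range here (0 ≤ start ≤ mid ≤ stop < len)
      if result = target then result
      else if result < target then fibSumGo nums target (mid + 1) stop fuel
      else fibSumGo nums target start (mid - 1) fuel
    else -1

def fibSumHelper (nums : List Int) (target : Int) : Int :=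
  fibSumGo nums target 0 (PySem.List.len nums - 1) (nums.length + 1)

-- the while loop of A; fuel 100 never runs out on the stated domain (|n| ≤ 2^31 < fib 47)
def loopA (n : Int) (nums : List Int) (i : Int) : Nat → Bool
  | 0 => false
  | fuel + 1 =>
    if PySem.List.pyGetD nums (-1) 0 < n then
      let curr := PySem.List.pyGetD nums (i - 1) 0 + PySem.List.pyGetD nums (i - 2) 0
      let target := n - curr
      if target < curr then
        if fibSumHelper nums target + curr = n then true
        else loopA n (nums ++ [curr]) (i + 1) fuel
      else loopA n (nums ++ [curr]) (i + 1) fuel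
    else false

def fibonacciSimpleSum2 (n : Int) : Bool :=
  if n = 1 then true else loopA n [0, 1] 2 100

-- ===== PORT B =====
-- build the set of all Fibonacci numbers ≤ n (fuel 100 never runs out on the stated domain)
def buildFibs (n a b : Int) (s : PySem.Set Int) : Nat → PySem.Set Int
  | 0 => s
  | fuel + 1 =>
    if a + b ≤ n then buildFibs n b (a + b) (PySem.Set.add s (a + b)) fuel else s

def fibonacciSimpleSum2_alt (n : Int) : Bool :=
  let s := buildFibs n 0 1 (PySem.Set.ofList [0, 1]) 100
  s.any (fun f => PySem.Set.contains s (n - f))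

-- ===== PRECONDITION & SPEC =====
-- On n = 0 A returns False though 0 = 0 + 0, and on n ≥ 12 with n + 1 a Fibonacci number A
-- returns True (its binary-search sentinel -1 satisfies result + curr == n) though no such n is a
-- sum of two Fibonacci numbers; B returns the intended answer (True for 0, False for the others).
def D_fibonacciSimpleSum2 (n : Int) : Prop :=
  n = 0 ∨ (12 ≤ n ∧ ∃ k, k < 50 ∧ (Nat.fib k : Int) = n + 1)
instance (n : Int) : Decidable (D_fibonacciSimpleSum2 n) := by
  unfold D_fibonacciSimpleSum2; infer_instance

def Spec_fibonacciSimpleSum2 (n : Int) (out : Bool) : Prop :=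
  ¬ D_fibonacciSimpleSum2 n → out = fibonacciSimpleSum2_alt n
instance (n : Int) (out : Bool) : Decidable (Spec_fibonacciSimpleSum2 n out) := by
  unfold Spec_fibonacciSimpleSum2; infer_instance

def pvDiffWitness_fibonacciSimpleSum2 : Int := 0
def pvDiffWitnessOut_fibonacciSimpleSum2 : Bool × Bool := (false, true)

-- ===== CLAIM (what is proved, stated in full; the proofs are below) =====
def Claim_unchanged_fibonacciSimpleSum2 : Prop :=
  ∀ (n : Int), Dom_fibonacciSimpleSum2 n → Spec_fibonacciSimpleSum2 n (fibonacciSimpleSum2 n)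
def Claim_changed_fibonacciSimpleSum2 : Prop :=
  Dom_fibonacciSimpleSum2 (pvDiffWitness_fibonacciSimpleSum2) ∧
  D_fibonacciSimpleSum2 (pvDiffWitness_fibonacciSimpleSum2) ∧
  fibonacciSimpleSum2 (pvDiffWitness_fibonacciSimpleSum2) = pvDiffWitnessOut_fibonacciSimpleSum2.1 ∧
  fibonacciSimpleSum2_alt (pvDiffWitness_fibonacciSimpleSum2) = pvDiffWitnessOut_fibonacciSimpleSum2.2 ∧
  pvDiffWitnessOut_fibonacciSimpleSum2.1 ≠ pvDiffWitnessOut_fibonacciSimpleSum2.2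
def Claim_exact_fibonacciSimpleSum2 : Prop :=
  ∀ (n : Int), Dom_fibonacciSimpleSum2 n → D_fibonacciSimpleSum2 n →
    fibonacciSimpleSum2 n ≠ fibonacciSimpleSum2_alt n

-- ===== LEMMAS AND PROOFS =====

-- the list A has built after reaching index i: [fib 0, …, fib (i-1)]
def fibL (i : Nat) : List Int := (List.range i).map fun k => (Nat.fib k : Int)

theorem length_fibL (i : Nat) : (fibL i).length = i := by simp [fibL]

theorem fibL_succ (i : Nat) : fibL (i + 1) = fibL i ++ [(Nat.fib i : Int)] := by
  simp [fibL, List.range_succ]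

theorem mem_fibL (i : Nat) (x : Int) : x ∈ fibL i ↔ ∃ k, k < i ∧ (Nat.fib k : Int) = x := by
  simp [fibL, List.mem_range]

theorem getElem_fibL (i k : Nat) (h : k < (fibL i).length) :
    (fibL i)[k] = (Nat.fib k : Int) := by
  simp [fibL] at h ⊢

theorem fib_cast_le {m k : Nat} (h : m ≤ k) : (Nat.fib m : Int) ≤ (Nat.fib k : Int) := by
  exact_mod_cast Nat.fib_mono h

theorem lt_idx_of_fib_lt {m k : Nat} (h : (Nat.fib m : Int) < (Nat.fib k : Int)) : m < k := by
  by_contra hc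
  push_neg at hc
  have := fib_cast_le hc
  omega

theorem fib47_big : (2147483649 : Int) < (Nat.fib 47 : Int) := by decide

theorem fibL_sorted (i : Nat) : (fibL i).Pairwise (· ≤ ·) := by
  rw [List.pairwise_iff_getElem]
  intro a b ha hb hab
  rw [getElem_fibL, getElem_fibL]
  exact fib_cast_le (by omega)

-- binary search returns the target or -1
theorem bsGo_eq_or (nums : List Int) (t : Int) :
    ∀ (fuel : Nat) (s e : Int), fibSumGo nums t s e fuel = t ∨ fibSumGo nums t s e fuel = -1 := by
  intro fuel
  induction fuel with
  | zero => intro s e; right; rfl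
  | succ f ih =>
    intro s e
    simp only [fibSumGo]
    split
    · by_cases heq : PySem.List.pyGetD nums (PySem.Int.floordiv (s + e) 2) 0 = t
      · rw [if_pos heq]; left; exact heq
      · rw [if_neg heq]
        split
        · exact ih _ _
        · exact ih _ _
    · right; rfl

-- soundness: a non-sentinel answer is a list element
theorem bsGo_sound (nums : List Int) (t : Int) :
    ∀ (fuel : Nat) (s e : Int), 0 ≤ s → e < (nums.length : Int) →
      fibSumGo nums t s e fuel = t → t = -1 ∨ t ∈ nums := by
  intro fuel
  induction fuel with
  | zero =>
    intro s e _ _ h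
    simp only [fibSumGo] at h
    left; omega
  | succ f ih =>
    intro s e hs he h
    simp only [fibSumGo] at h
    by_cases hse : s ≤ e
    · rw [if_pos hse] at h
      obtain ⟨hm1, hm2⟩ := PySem.Int.floordiv_two_mid_bounds hse
      by_cases heq : PySem.List.pyGetD nums (PySem.Int.floordiv (s + e) 2) 0 = t
      · right
        rw [← heq]
        exact PySem.List.pyGetD_mem (xs := nums)
          (i := PySem.Int.floordiv (s + e) 2) 0 (by constructor <;> omega)
      · rw [if_neg heq] at h
        split at h
        · exact ih _ _ (by omega) he h
        · exact ih _ _ hs (by omega) h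
    · rw [if_neg hse] at h
      left; omega

-- completeness on a sorted list with enough fuel
theorem bsGo_complete (nums : List Int) (t : Int) (hs : nums.Pairwise (· ≤ ·)) :
    ∀ (fuel : Nat) (s e : Int) (j : Nat) (hj : j < nums.length), 0 ≤ s →
      e < (nums.length : Int) →
      s ≤ (j : Int) → (j : Int) ≤ e → nums[j] = t → (e + 1 - s).toNat < fuel →
      fibSumGo nums t s e fuel = t := by
  have hmono : ∀ (u v : Nat) (hu : u < nums.length) (hv : v < nums.length),
      u ≤ v → nums[u] ≤ nums[v] := by
    intro u v hu hv huv
    rcases Nat.lt_or_ge u v with hlt | hge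
    · exact (List.pairwise_iff_getElem.mp hs) u v hu hv hlt
    · have : u = v := by omega
      subst this; exact le_refl _
  intro fuel
  induction fuel with
  | zero => intro s e j hj h0s h0e h1 h2 h3 h4; omega
  | succ f ih =>
    intro s e j hj h0s h0e h1 h2 h3 h4
    have hse : s ≤ e := le_trans h1 h2
    simp only [fibSumGo, if_pos hse]
    obtain ⟨hm1, hm2⟩ := PySem.Int.floordiv_two_mid_bounds hse
    set mid := PySem.Int.floordiv (s + e) 2 with hmid
    have hmn : mid.toNat < nums.length := by omega
    have hgd : PySem.List.pyGetD nums mid 0 = nums[mid.toNat] := by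
      exact PySem.List.pyGetD_eq_getElem nums 0 (by omega) (by omega)
    by_cases heq : PySem.List.pyGetD nums mid 0 = t
    · rw [if_pos heq]; exact heq
    · rw [if_neg heq]
      by_cases hlt : PySem.List.pyGetD nums mid 0 < t
      · rw [if_pos hlt]
        have hjm : mid < (j : Int) := by
          by_contra hc
          push_neg at hc
          have := hmono j mid.toNat hj hmn (by omega)
          rw [h3] at this
          rw [hgd] at hlt
          omega
        exact ih (mid + 1) e j hj (by omega) h0e (by omega) h2 h3 (by omega)
      · rw [if_neg hlt]
        have hjm : (j : Int) < mid := by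
          by_contra hc
          push_neg at hc
          have := hmono mid.toNat j hmn hj (by omega)
          rw [h3] at this
          rw [hgd] at heq hlt
          omega
        exact ih s (mid - 1) j hj h0s (by omega) h1 (by omega) h3 (by omega)

theorem helper_eq_iff (i : Nat) (t : Int) :
    fibSumHelper (fibL i) t = t ↔ (t = -1 ∨ t ∈ fibL i) := by
  unfold fibSumHelper
  constructor
  · intro h
    exact bsGo_sound (fibL i) t _ 0 (PySem.List.len (fibL i) - 1) (le_refl 0) (by
      simp only [PySem.List.len_eq]; omega) h
  · rintro (h | h)
    · rcases bsGo_eq_or (fibL i) t ((fibL i).length + 1) 0 (PySem.List.len (fibL i) - 1) with h2 | h2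
      · exact h2
      · rw [h2, h]
    · obtain ⟨j, hj, hget⟩ := List.getElem_of_mem h
      refine bsGo_complete (fibL i) t (fibL_sorted i) _ 0 (PySem.List.len (fibL i) - 1) j hj
        (le_refl 0) (by simp only [PySem.List.len_eq]; omega) (by omega)
        (by simp only [PySem.List.len_eq]; omega) hget ?_
      simp only [PySem.List.len_eq]
      omega

-- the per-step success condition of A's loop at index j
def condA (n : Int) (j : Nat) : Prop :=
  (Nat.fib (j - 1) : Int) < n ∧ n - (Nat.fib j : Int) < (Nat.fib j : Int) ∧
    (n - (Nat.fib j : Int) = -1 ∨ n - (Nat.fib j : Int) ∈ fibL j)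

theorem loopA_iff (n : Int) :
    ∀ (fuel : Nat) (i : Nat), 2 ≤ i →
      (loopA n (fibL i) (i : Int) fuel = true ↔
        ∃ j, i ≤ j ∧ j < i + fuel ∧ condA n j) := by
  intro fuel
  induction fuel with
  | zero =>
    intro i hi
    simp only [loopA]
    constructor
    · intro h; cases h
    · rintro ⟨j, hj1, hj2, _⟩; omega
  | succ f ih =>
    intro i hi
    have hsplit : fibL i = fibL (i - 1) ++ [(Nat.fib (i - 1) : Int)] := by
      conv_lhs => rw [show i = i - 1 + 1 by omega]
      exact fibL_succ (i - 1)
    have hlast : PySem.List.pyGetD (fibL i) (-1) 0 = (Nat.fib (i - 1) : Int) := by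
      rw [hsplit]
      exact PySem.List.pyGetD_neg_one_append_singleton _ _ _
    have hg1 : PySem.List.pyGetD (fibL i) ((i : Int) - 1) 0 = (Nat.fib (i - 1) : Int) := by
      rw [PySem.List.pyGetD_eq_getElem (fibL i) 0 (by omega)
        (by simp only [length_fibL]; omega)]
      rw [getElem_fibL i _ (by simp only [length_fibL]; omega)]
      rw [show ((i : Int) - 1).toNat = i - 1 from by omega]
    have hg2 : PySem.List.pyGetD (fibL i) ((i : Int) - 2) 0 = (Nat.fib (i - 2) : Int) := by
      rw [PySem.List.pyGetD_eq_getElem (fibL i) 0 (by omega)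
        (by simp only [length_fibL]; omega)]
      rw [getElem_fibL i _ (by simp only [length_fibL]; omega)]
      rw [show ((i : Int) - 2).toNat = i - 2 from by omega]
    have hcur : (Nat.fib (i - 1) : Int) + (Nat.fib (i - 2) : Int) = (Nat.fib i : Int) := by
      have h2 : i - 2 + 2 = i := by omega
      have h3 : i - 2 + 1 = i - 1 := by omega
      have hf := Nat.fib_add_two (n := i - 2)
      rw [h2, h3] at hf
      exact_mod_cast (by omega : Nat.fib (i - 1) + Nat.fib (i - 2) = Nat.fib i)
    have hnext : fibL i ++ [(Nat.fib i : Int)] = fibL (i + 1) := (fibL_succ i).symm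
    have hcast : ((i : Int) + 1) = ((i + 1 : Nat) : Int) := by push_cast; ring
    have hshift : ¬ condA n i →
        ((∃ j, i + 1 ≤ j ∧ j < i + 1 + f ∧ condA n j) ↔
          (∃ j, i ≤ j ∧ j < i + (f + 1) ∧ condA n j)) := by
      intro hnc
      constructor
      · rintro ⟨j, h1, h2, h3⟩; exact ⟨j, by omega, by omega, h3⟩
      · rintro ⟨j, h1, h2, h3⟩
        rcases Nat.eq_or_lt_of_le h1 with he | hl
        · exact absurd (he ▸ h3) hnc
        · exact ⟨j, by omega, by omega, h3⟩
    simp only [loopA, hlast, hg1, hg2, hcur, hnext, hcast]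
    by_cases hguard : (Nat.fib (i - 1) : Int) < n
    · rw [if_pos hguard]
      by_cases ht : n - (Nat.fib i : Int) < (Nat.fib i : Int)
      · rw [if_pos ht]
        by_cases hfound : fibSumHelper (fibL i) (n - (Nat.fib i : Int)) + (Nat.fib i : Int) = n
        · rw [if_pos hfound]
          have hcond : condA n i := by
            refine ⟨hguard, ht, ?_⟩
            exact (helper_eq_iff i _).mp (by omega)
          simp only [true_iff]
          exact ⟨i, le_refl i, by omega, hcond⟩
        · rw [if_neg hfound]
          rw [ih (i + 1) (by omega)]
          apply hshift
          intro hc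
          exact hfound (by
            have := (helper_eq_iff i (n - (Nat.fib i : Int))).mpr hc.2.2
            omega)
      · rw [if_neg ht]
        rw [ih (i + 1) (by omega)]
        apply hshift
        intro hc
        exact ht hc.2.1
    · rw [if_neg hguard]
      constructor
      · intro h; cases h
      · rintro ⟨j, h1, h2, h3⟩
        have := fib_cast_le (show i - 1 ≤ j - 1 by omega)
        have := h3.1
        omega

-- A's full characterisation on the domain
theorem Achar (n : Int) (hn : n ≤ 2147483648) (hne : n ≠ 1) :
    fibonacciSimpleSum2 n = true ↔ ∃ j, 2 ≤ j ∧ condA n j := by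
  unfold fibonacciSimpleSum2
  rw [if_neg hne]
  have h01 : ([0, 1] : List Int) = fibL 2 := by decide
  have h2 : (2 : Int) = ((2 : Nat) : Int) := by norm_num
  rw [h01, h2, loopA_iff n 100 2 (by omega)]
  constructor
  · rintro ⟨j, h1, _, h3⟩; exact ⟨j, h1, h3⟩
  · rintro ⟨j, h1, h3⟩
    refine ⟨j, h1, ?_, h3⟩
    by_contra hc
    push_neg at hc
    have hle := fib_cast_le (show 47 ≤ j - 1 by omega)
    have := fib47_big
    have := h3.1
    omega

theorem build_iff (n : Int) :
    ∀ (fuel : Nat) (i : Nat) (s : PySem.Set Int), 2 ≤ i →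
      (∀ x, x ∈ s ↔ ∃ k, k < i ∧ (Nat.fib k : Int) = x) →
      n < (Nat.fib (i - 1 + fuel) : Int) →
      ∀ x, x ∈ buildFibs n (Nat.fib (i - 2)) (Nat.fib (i - 1)) s fuel ↔
        ∃ k, (Nat.fib k : Int) = x ∧ (k < i ∨ (Nat.fib k : Int) ≤ n) := by
  intro fuel
  induction fuel with
  | zero =>
    intro i s hi hs hlt x
    simp only [buildFibs]
    rw [hs x]
    constructor
    · rintro ⟨k, hk, he⟩; exact ⟨k, he, Or.inl hk⟩
    · rintro ⟨k, he, hk | hk⟩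
      · exact ⟨k, hk, he⟩
      · refine ⟨k, ?_, he⟩
        by_contra hc
        push_neg at hc
        have := fib_cast_le (show i - 1 + 0 ≤ k by omega)
        omega
  | succ f ih =>
    intro i s hi hs hlt x
    simp only [buildFibs]
    have hcur : (Nat.fib (i - 2) : Int) + (Nat.fib (i - 1) : Int) = (Nat.fib i : Int) := by
      have h2 : i - 2 + 2 = i := by omega
      have h3 : i - 2 + 1 = i - 1 := by omega
      have hf := Nat.fib_add_two (n := i - 2)
      rw [h2, h3] at hf
      exact_mod_cast (by omega : Nat.fib (i - 2) + Nat.fib (i - 1) = Nat.fib i)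
    rw [hcur]
    by_cases hg : (Nat.fib i : Int) ≤ n
    · rw [if_pos hg]
      have hinv : ∀ y, y ∈ PySem.Set.add s (Nat.fib i : Int) ↔
          ∃ k, k < i + 1 ∧ (Nat.fib k : Int) = y := by
        intro y
        rw [PySem.Set.mem_add, hs y]
        constructor
        · rintro (⟨k, hk, he⟩ | he)
          · exact ⟨k, by omega, he⟩
          · exact ⟨i, by omega, he.symm⟩
        · rintro ⟨k, hk, he⟩
          rcases Nat.lt_or_ge k i with hki | hki
          · exact Or.inl ⟨k, hki, he⟩
          · have : k = i := by omega
            subst this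
            exact Or.inr he.symm
      have := ih (i + 1) (PySem.Set.add s (Nat.fib i : Int)) (by omega) hinv
        (by rw [show i + 1 - 1 + f = i - 1 + (f + 1) from by omega]; exact hlt) x
      rw [show i + 1 - 2 = i - 1 from by omega, show i + 1 - 1 = i from by omega] at this
      rw [this]
      constructor
      · rintro ⟨k, he, hk | hk⟩
        · rcases Nat.lt_or_ge k i with hki | hki
          · exact ⟨k, he, Or.inl hki⟩
          · have : k = i := by omega
            subst this
            exact ⟨k, he, Or.inr hg⟩
        · exact ⟨k, he, Or.inr hk⟩
      · rintro ⟨k, he, hk | hk⟩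
        · exact ⟨k, he, Or.inl (by omega)⟩
        · exact ⟨k, he, Or.inr hk⟩
    · rw [if_neg hg]
      push_neg at hg
      rw [hs x]
      constructor
      · rintro ⟨k, hk, he⟩; exact ⟨k, he, Or.inl hk⟩
      · rintro ⟨k, he, hk | hk⟩
        · exact ⟨k, hk, he⟩
        · refine ⟨k, ?_, he⟩
          by_contra hc
          push_neg at hc
          have := fib_cast_le (show i ≤ k by omega)
          omega

-- B's full characterisation on the domain
theorem Bchar (n : Int) (hn : n ≤ 2147483648) :
    fibonacciSimpleSum2_alt n = true ↔ ∃ a b : Nat, (Nat.fib a : Int) + (Nat.fib b : Int) = n := by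
  have hinv : ∀ x, x ∈ PySem.Set.ofList ([0, 1] : List Int) ↔
      ∃ k, k < 2 ∧ (Nat.fib k : Int) = x := by
    intro x
    rw [PySem.Set.mem_ofList]
    constructor
    · intro hx
      rcases List.mem_pair.mp hx with rfl | rfl
      · exact ⟨0, by omega, by norm_num⟩
      · exact ⟨1, by omega, by norm_num⟩
    · rintro ⟨k, hk, he⟩
      interval_cases k
      · simp only [Nat.fib_zero, Int.natCast_zero] at he
        rw [← he]; exact List.mem_cons_self
      · simp only [Nat.fib_one, Int.natCast_one] at he
        rw [← he]; simp
  have hsuff : n < (Nat.fib (2 - 1 + 100) : Int) := by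
    have := fib_cast_le (show 47 ≤ 2 - 1 + 100 by omega)
    have := fib47_big
    omega
  have hmem := build_iff n 100 2 (PySem.Set.ofList [0, 1]) (by omega) hinv hsuff
  have h0 : (Nat.fib (2 - 2) : Int) = 0 := by norm_num
  have h1 : (Nat.fib (2 - 1) : Int) = 1 := by norm_num
  rw [h0, h1] at hmem
  show (buildFibs n 0 1 (PySem.Set.ofList [0, 1]) 100).any
      (fun f => PySem.Set.contains (buildFibs n 0 1 (PySem.Set.ofList [0, 1]) 100) (n - f)) = true ↔ _
  rw [List.any_eq_true]
  constructor
  · rintro ⟨f, hf, hc⟩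
    rw [PySem.Set.contains_iff] at hc
    obtain ⟨a, ha, -⟩ := (hmem f).mp hf
    obtain ⟨b, hb, -⟩ := (hmem (n - f)).mp hc
    exact ⟨a, b, by omega⟩
  · rintro ⟨a, b, hsum⟩
    have hfa := Int.natCast_nonneg (Nat.fib a)
    have hfb := Int.natCast_nonneg (Nat.fib b)
    refine ⟨(Nat.fib a : Int), (hmem _).mpr ⟨a, rfl, Or.inr (by omega)⟩, ?_⟩
    rw [PySem.Set.contains_iff]
    exact (hmem _).mpr ⟨b, by omega, Or.inr (by omega)⟩

-- a strict decomposition yields a successful loop step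
theorem sum_to_condA (n : Int) (a b : Nat) (hab : (Nat.fib a : Int) < Nat.fib b)
    (hsum : (Nat.fib a : Int) + Nat.fib b = n) (hn : 2 ≤ n) : ∃ j, 2 ≤ j ∧ condA n j := by
  have hfb2 : (2 : Int) ≤ Nat.fib b := by omega
  have hb3 : 3 ≤ b := by
    by_contra hc
    push_neg at hc
    have := fib_cast_le (show b ≤ 2 by omega)
    have : (Nat.fib 2 : Int) = 1 := by norm_num
    omega
  refine ⟨b, by omega, ?_, by omega, Or.inr ?_⟩
  · -- fib (b - 1) < n
    by_contra hc
    push_neg at hc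
    have hm := fib_cast_le (show b - 1 ≤ b by omega)
    have hfa := Int.natCast_nonneg (Nat.fib a)
    have heq : (Nat.fib (b - 1) : Int) = Nat.fib b := by omega
    have hlt := Nat.fib_lt_fib_succ (show 2 ≤ b - 1 by omega)
    rw [show b - 1 + 1 = b from by omega] at hlt
    have : (Nat.fib (b - 1) : Int) < Nat.fib b := by exact_mod_cast hlt
    omega
  · rw [mem_fibL]
    exact ⟨a, lt_idx_of_fib_lt hab, by omega⟩

theorem sum_exists_condA (n : Int) (a b : Nat)
    (hsum : (Nat.fib a : Int) + Nat.fib b = n) (hn : 2 ≤ n) : ∃ j, 2 ≤ j ∧ condA n j := by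
  rcases lt_trichotomy ((Nat.fib a : Int)) ((Nat.fib b : Int)) with h | h | h
  · exact sum_to_condA n a b h hsum hn
  · -- equal halves: n = 2 * fib b; rewrite as fib (c-2) + fib (c+1) with fib c = fib b, 2 ≤ c
    have hfb1 : (1 : Int) ≤ Nat.fib b := by omega
    obtain ⟨c, hc2, hceq⟩ : ∃ c, 2 ≤ c ∧ (Nat.fib c : Int) = Nat.fib b := by
      rcases Nat.lt_or_ge b 2 with hb | hb
      · refine ⟨2, le_refl 2, ?_⟩
        have h1 := fib_cast_le (show b ≤ 1 by omega)
        have e1 : (Nat.fib 1 : Int) = 1 := by norm_num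
        have e2 : (Nat.fib 2 : Int) = 1 := by norm_num
        omega
      · exact ⟨b, hb, rfl⟩
    have e1 : Nat.fib (c - 2) + Nat.fib (c - 1) = Nat.fib c := by
      have hf := Nat.fib_add_two (n := c - 2)
      rw [show c - 2 + 2 = c from by omega, show c - 2 + 1 = c - 1 from by omega] at hf
      omega
    have e2 : Nat.fib (c - 1) + Nat.fib c = Nat.fib (c + 1) := by
      have hf := Nat.fib_add_two (n := c - 1)
      rw [show c - 1 + 2 = c + 1 from by omega, show c - 1 + 1 = c from by omega] at hf
      omega
    have e1' : (Nat.fib (c - 2) : Int) + Nat.fib (c - 1) = Nat.fib c := by exact_mod_cast e1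
    have e2' : (Nat.fib (c - 1) : Int) + Nat.fib c = Nat.fib (c + 1) := by exact_mod_cast e2
    have hm : (Nat.fib (c - 2) : Int) ≤ Nat.fib (c - 1) := fib_cast_le (by omega)
    have hc1 : (1 : Int) ≤ Nat.fib c := by omega
    exact sum_to_condA n (c - 2) (c + 1) (by omega) (by omega) hn
  · exact sum_to_condA n b a h (by omega) hn

-- the sentinel (t = -1) step is only reachable inside D_ or for n ∈ {2, 4, 7}, which are sums
theorem condA_to_sum (n : Int) (hn2 : 2 ≤ n) (hn : n ≤ 2147483648)
    (hD : ¬ D_fibonacciSimpleSum2 n) (j : Nat) (hj : 2 ≤ j) (hc : condA n j) :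
    ∃ a b : Nat, (Nat.fib a : Int) + (Nat.fib b : Int) = n := by
  obtain ⟨h1, h2, h3 | h3⟩ := hc
  · -- sentinel case: fib j = n + 1
    have hfj : (Nat.fib j : Int) = n + 1 := by omega
    have hj46 : j ≤ 46 := by
      by_contra hc'
      push_neg at hc'
      have := fib_cast_le (show 47 ≤ j by omega)
      have := fib47_big
      omega
    have hn11 : n ≤ 11 := by
      by_contra hc'
      push_neg at hc'
      exact hD (Or.inr ⟨by omega, j, by omega, by omega⟩)
    have hj6 : j ≤ 6 := by
      by_contra hc'
      push_neg at hc'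
      have := fib_cast_le (show 7 ≤ j by omega)
      have h7 : (Nat.fib 7 : Int) = 13 := by norm_num
      omega
    interval_cases j
    · norm_num at hfj; omega
    · norm_num at hfj; omega
    · exact ⟨1, 2, by norm_num at hfj ⊢; omega⟩
    · exact ⟨1, 4, by norm_num [Nat.fib] at hfj ⊢; omega⟩
    · exact ⟨3, 5, by norm_num [Nat.fib] at hfj ⊢; omega⟩
  · rw [mem_fibL] at h3
    obtain ⟨k, hk, he⟩ := h3
    exact ⟨k, j, by omega⟩

-- fib k - 1 is not a sum of two Fibonacci numbers once k ≥ 7  (Nat form)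
theorem fib_sub_one_not_sum (k a b : Nat) (hk : 7 ≤ k) (hab : Nat.fib a ≤ Nat.fib b) :
    Nat.fib a + Nat.fib b + 1 ≠ Nat.fib k := by
  intro heq
  have natlt : ∀ u v : Nat, Nat.fib u < Nat.fib v → u < v := by
    intro u v huv
    by_contra hc
    push_neg at hc
    exact absurd (Nat.fib_mono hc) (by omega)
  have e1 : Nat.fib (k - 2) + Nat.fib (k - 1) = Nat.fib k := by
    have hf := Nat.fib_add_two (n := k - 2)
    rw [show k - 2 + 2 = k from by omega, show k - 2 + 1 = k - 1 from by omega] at hf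
    omega
  have e2 : Nat.fib (k - 3) + Nat.fib (k - 2) = Nat.fib (k - 1) := by
    have hf := Nat.fib_add_two (n := k - 3)
    rw [show k - 3 + 2 = k - 1 from by omega, show k - 3 + 1 = k - 2 from by omega] at hf
    omega
  have e3 : Nat.fib (k - 4) + Nat.fib (k - 3) = Nat.fib (k - 2) := by
    have hf := Nat.fib_add_two (n := k - 4)
    rw [show k - 4 + 2 = k - 2 from by omega, show k - 4 + 1 = k - 3 from by omega] at hf
    omega
  have h4 : Nat.fib 4 ≤ Nat.fib (k - 3) := Nat.fib_mono (by omega)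
  have h3 : Nat.fib 3 ≤ Nat.fib (k - 4) := Nat.fib_mono (by omega)
  have hf4 : Nat.fib 4 = 3 := by norm_num
  have hf3 : Nat.fib 3 = 2 := by norm_num
  -- step 1: fib b = fib (k - 1)
  have hb1 : Nat.fib (k - 1) ≤ Nat.fib b := by
    by_contra hc
    push_neg at hc
    have hbk : b < k - 1 := natlt b (k - 1) hc
    have := Nat.fib_mono (show b ≤ k - 2 by omega)
    omega
  have hbk : b < k := natlt b k (by omega)
  have hb2 : Nat.fib b ≤ Nat.fib (k - 1) := Nat.fib_mono (by omega)
  -- step 2: fib a = fib (k - 2) - 1 lies strictly between consecutive fibs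
  have ha1 : Nat.fib a + 1 = Nat.fib (k - 2) := by omega
  have hak : a < k - 2 := natlt a (k - 2) (by omega)
  have := Nat.fib_mono (show a ≤ k - 3 by omega)
  omega

-- ===== VERDICT (by name: the statement is the Claim_ definition above) =====
theorem fibonacciSimpleSum2_spec : Claim_unchanged_fibonacciSimpleSum2 := by
  intro n hDom
  unfold Spec_fibonacciSimpleSum2
  intro hD
  unfold Dom_fibonacciSimpleSum2 pvDomInt at hDom
  rw [decide_eq_true_iff] at hDom
  rw [Bool.eq_iff_iff]
  by_cases h1 : n = 1
  · subst h1
    constructor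
    · intro _
      rw [Bchar 1 (by omega)]
      exact ⟨0, 1, by decide⟩
    · intro _
      unfold fibonacciSimpleSum2
      rw [if_pos rfl]
  · rw [Achar n (by omega) h1, Bchar n (by omega)]
    by_cases h2 : 2 ≤ n
    · constructor
      · rintro ⟨j, hj, hc⟩
        exact condA_to_sum n h2 (by omega) hD j hj hc
      · rintro ⟨a, b, hs⟩
        exact sum_exists_condA n a b hs h2
    · have hn0 : n ≠ 0 := fun h => hD (Or.inl h)
      constructor
      · rintro ⟨j, hj, hc⟩
        have hfc := hc.1
        have := Int.natCast_nonneg (Nat.fib (j - 1))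
        omega
      · rintro ⟨a, b, hs⟩
        have := Int.natCast_nonneg (Nat.fib a)
        have := Int.natCast_nonneg (Nat.fib b)
        omega

theorem fibonacciSimpleSum2_changed : Claim_changed_fibonacciSimpleSum2 := by
  unfold Claim_changed_fibonacciSimpleSum2; decide

theorem fibonacciSimpleSum2_tight : Claim_exact_fibonacciSimpleSum2 := by
  intro n hDom hD
  unfold Dom_fibonacciSimpleSum2 pvDomInt at hDom
  rw [decide_eq_true_iff] at hDom
  rcases hD with h0 | ⟨h12, k, hk50, hfib⟩
  · subst h0
    decide
  · have hk7 : 7 ≤ k := by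
      by_contra hc
      push_neg at hc
      have := fib_cast_le (show k ≤ 6 by omega)
      have h6 : (Nat.fib 6 : Int) = 8 := by norm_num
      omega
    have hfkpos : (13 : Int) ≤ Nat.fib k := by omega
    have hA : fibonacciSimpleSum2 n = true := by
      rw [Achar n (by omega) (by omega)]
      refine ⟨k, by omega, ?_, by omega, Or.inl (by omega)⟩
      -- fib (k - 1) < n, since fib (k - 1) = n + 1 - fib (k - 2) and fib (k - 2) ≥ 5
      have e1 : (Nat.fib (k - 2) : Int) + Nat.fib (k - 1) = Nat.fib k := by
        have hf := Nat.fib_add_two (n := k - 2)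
        rw [show k - 2 + 2 = k from by omega, show k - 2 + 1 = k - 1 from by omega] at hf
        exact_mod_cast (by omega : Nat.fib (k - 2) + Nat.fib (k - 1) = Nat.fib k)
      have e2 : (Nat.fib 5 : Int) ≤ Nat.fib (k - 2) := fib_cast_le (by omega)
      have e3 : (Nat.fib 5 : Int) = 5 := by norm_num
      omega
    intro hEq
    rw [hA] at hEq
    have hBt := (Bchar n (by omega)).mp hEq.symm
    obtain ⟨a, b, hs⟩ := hBt
    have hnatk : Nat.fib a + Nat.fib b + 1 = Nat.fib k := by
      exact_mod_cast (by omega :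
        ((Nat.fib a : Int) + Nat.fib b + 1 : Int) = (Nat.fib k : Int))
    rcases le_total (Nat.fib a) (Nat.fib b) with hab | hab
    · exact fib_sub_one_not_sum k a b hk7 hab hnatk
    · exact fib_sub_one_not_sum k b a hk7 hab (by omega)
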